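-- pv_equiv track=rewrite | github.com/pytoolsip/website | test/test.py | decodePwd
-- ===== SOURCE A (Python) =====
-- import math;
--
-- def decodePwd(pwd, code):
--     space, increment = math.floor(code/10) + 1, code%10 + 1;
--     pwdsLen = ord(pwd[0]) - increment - 32;
--     pwds, pwdIdx = [""] * pwdsLen, 1;
--     for i in range(space):
--         for j in range(math.ceil(pwdsLen/space)):
--             idx = i+j*space;
--             if idx < pwdsLen and pwdIdx < len(pwd):
--                 pwds[idx] = chr(ord(pwd[pwdIdx]) - increment);
--             pwdIdx+=1;
--             increment+=1;
--     return "".join(pwds);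
-- ===== SOURCE B (Python) =====
-- def decodePwd(pwd, code):
--     # Gather formulation: instead of scattering decoded chars into a mutable
--     # buffer with nested column/row loops, compute for each output position
--     # idx the source index c via the inverse transposition permutation.
--     space, base = code // 10 + 1, code % 10 + 1
--     pwdsLen = ord(pwd[0]) - base - 32
--     if space <= 0:
--         return "" * max(pwdsLen, 0)
--     rows = -(-pwdsLen // space)
--     out = []
--     for idx in range(pwdsLen):
--         c = (idx % space) * rows + idx // space
--         out.append(chr(ord(pwd[1 + c]) - base - c) if 1 + c < len(pwd) else "")
--     return "".join(out)
-- ===== Notes on version B (the rewrite author's own statement) =====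
-- stated objective: alternative
-- what changed: B replaces A's scatter (nested column/row loops mutating a preallocated buffer with running pwdIdx/increment counters) by a gather: one pass over output positions computing the source index via the inverse transposition permutation c=(idx%space)*rows+idx//space.
import Mathlib
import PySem

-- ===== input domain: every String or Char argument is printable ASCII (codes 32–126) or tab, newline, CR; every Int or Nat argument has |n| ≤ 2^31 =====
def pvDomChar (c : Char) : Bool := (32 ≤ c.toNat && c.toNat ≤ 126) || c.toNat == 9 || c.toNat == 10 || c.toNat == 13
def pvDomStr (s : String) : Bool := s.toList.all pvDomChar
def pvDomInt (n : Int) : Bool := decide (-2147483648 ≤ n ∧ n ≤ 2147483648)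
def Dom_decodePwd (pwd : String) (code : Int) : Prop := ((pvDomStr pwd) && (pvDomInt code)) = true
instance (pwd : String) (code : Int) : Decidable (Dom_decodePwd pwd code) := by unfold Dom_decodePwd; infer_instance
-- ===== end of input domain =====

-- B replaces A's nested scatter loops (mutable buffer + running counters) by a single
-- gather pass using the inverse transposition permutation; equal output on all of Pre_.


-- ===== PORT A =====
-- one step of A's inner loop body: state = (pwds, pwdIdx, increment)
def pvInnerA (pwd : String) (pwdsLen space : Int)
    (st : List String × Int × Int) (i j : Int) : List String × Int × Int :=
  let idx := i + j * space
  let pwds :=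
    if idx < pwdsLen ∧ st.2.1 < (PySem.Str.len pwd : Int) then
      match PySem.Str.pyGet? pwd st.2.1 with
      | some ch => st.1.set idx.toNat (String.singleton (Char.ofNat ((ch.toNat : Int) - st.2.2).toNat))
      | none => st.1  -- unreachable: the guard ensures the index is in range
    else st.1
  (pwds, st.2.1 + 1, st.2.2 + 1)

def decodePwd (pwd : String) (code : Int) : String :=
  let space : Int := PySem.Int.floordiv code 10 + 1
  let increment : Int := PySem.Int.mod code 10 + 1
  match PySem.Str.pyGet? pwd 0 with
  | none => ""  -- pwd[0] raises IndexError in Python; excluded by Pre_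
  | some c0 =>
    let pwdsLen : Int := (c0.toNat : Int) - increment - 32
    -- math.ceil(pwdsLen/space) is exact at these magnitudes: -((-pwdsLen) // space)
    let rows : Int := -(PySem.Int.floordiv (-pwdsLen) space)
    let st := (PySem.List.pyRange 0 space 1).foldl
      (fun st i => (PySem.List.pyRange 0 rows 1).foldl
        (fun st j => pvInnerA pwd pwdsLen space st i j) st)
      (List.replicate pwdsLen.toNat "", 1, increment)
    PySem.Str.join "" st.1

-- ===== PORT B =====
def decodePwd_alt (pwd : String) (code : Int) : String :=
  let space : Int := PySem.Int.floordiv code 10 + 1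
  let base : Int := PySem.Int.mod code 10 + 1
  match PySem.Str.pyGet? pwd 0 with
  | none => ""  -- ord(pwd[0]) raises IndexError in Python; excluded by Pre_
  | some c0 =>
    let pwdsLen : Int := (c0.toNat : Int) - base - 32
    if space ≤ 0 then "" else
    let rows : Int := -(PySem.Int.floordiv (-pwdsLen) space)
    PySem.Str.join "" ((PySem.List.pyRange 0 pwdsLen 1).map (fun idx =>
      let c := PySem.Int.mod idx space * rows + PySem.Int.floordiv idx space
      if 1 + c < (PySem.Str.len pwd : Int) then
        match PySem.Str.pyGet? pwd (1 + c) with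
        | some ch => String.singleton (Char.ofNat ((ch.toNat : Int) - (base + c)).toNat)
        | none => ""  -- unreachable under the guard
      else ""))

-- ===== PRECONDITION & SPEC =====
-- Pre_ excludes exactly the inputs on which Python A raises: the empty string
-- (IndexError on pwd[0]) and inputs where some decoded cell's code point
-- ord(pwd[1+c]) - increment - c is negative (ValueError from chr).
def Pre_decodePwd (pwd : String) (code : Int) : Prop :=
  pwd ≠ "" ∧
  (let space : Int := PySem.Int.floordiv code 10 + 1
   let base : Int := PySem.Int.mod code 10 + 1
   let pwdsLen : Int := ((pwd.toList.headD ' ').toNat : Int) - base - 32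
   let rows : Int := -(PySem.Int.floordiv (-pwdsLen) space)
   0 < space →
     ∀ idx ∈ PySem.List.pyRange 0 pwdsLen 1,
       ((PySem.List.pyGet? pwd.toList
           (1 + (PySem.Int.mod idx space * rows + PySem.Int.floordiv idx space))).all
         (fun ch => decide (base + (PySem.Int.mod idx space * rows + PySem.Int.floordiv idx space)
                              ≤ (ch.toNat : Int)))) = true)

instance (pwd : String) (code : Int) : Decidable (Pre_decodePwd pwd code) := by
  unfold Pre_decodePwd; infer_instance

def pvWitness_decodePwd : String × Int := ("X", 0)

def Spec_decodePwd (pwd : String) (code : Int) (out : String) : Prop := out = decodePwd_alt pwd code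
instance (pwd : String) (code : Int) (out : String) : Decidable (Spec_decodePwd pwd code out) := by unfold Spec_decodePwd; infer_instance

-- ===== CLAIM (what is proved, stated in full; the proofs are below) =====
def Claim_equal_decodePwd : Prop := ∀ (pwd : String) (code : Int), Dom_decodePwd pwd code → Pre_decodePwd pwd code → Spec_decodePwd pwd code (decodePwd pwd code)

-- ===== LEMMAS AND PROOFS =====

-- the decoded cell for source step c (both ports compute exactly this string)
def pvGcell (pl : List Char) (base : Int) (c : Nat) : String :=
  match pl[1+c]? with
  | some ch => String.singleton (Char.ofNat ((ch.toNat : Int) - (base + (c : Int))).toNat)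
  | none => ""

-- the effect of A's c-th inner-loop step on the buffer alone (counters eliminated)
def pvStepC (pl : List Char) (base : Int) (N S R : Nat) (L : List String) (c : Nat) : List String :=
  if c / R + (c % R) * S < N ∧ 1 + c < pl.length then
    L.set (c / R + (c % R) * S) (pvGcell pl base c)
  else L

theorem pvJoinAllNil : ∀ (ls : List (List Char)), (∀ x ∈ ls, x = []) → PySem.Chars.join [] ls = [] := by
  intro ls
  induction ls with
  | nil => intro _; rfl
  | cons p t ih =>
    intro h
    cases t with
    | nil => rw [PySem.Chars.join_singleton]; exact h p (by simp)
    | cons q t' =>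
      rw [PySem.Chars.join_cons_cons, h p (by simp), ih (fun x hx => h x (by simp [hx]))]
      rfl

theorem pvJoinRep (m : Nat) : PySem.Str.join "" (List.replicate m "") = "" := by
  apply String.toList_inj.mp
  rw [PySem.Str.toList_join, List.map_replicate]
  exact pvJoinAllNil _ (fun x hx => by simpa using List.eq_of_mem_replicate hx)

theorem pvFoldlId {α β : Type} (l : List α) (x : β) : l.foldl (fun st _ => st) x = x := by
  induction l with
  | nil => rfl
  | cons a t ih => exact ih

theorem pvFoldLen (pl : List Char) (base : Int) (N S R : Nat) :
    ∀ (cs : List Nat) (L : List String), (cs.foldl (pvStepC pl base N S R) L).length = L.length := by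
  intro cs
  induction cs with
  | nil => intro L; rfl
  | cons c t ih =>
    intro L
    rw [List.foldl_cons, ih]
    unfold pvStepC
    split <;> simp

theorem pvFlatDivMod (a b R : Nat) (hb : b < R) :
    (a * R + b) / R = a ∧ (a * R + b) % R = b := by
  have hR : 0 < R := by omega
  constructor
  · rw [Nat.add_comm, Nat.add_mul_div_right _ _ hR, Nat.div_eq_of_lt hb, Nat.zero_add]
  · rw [Nat.add_comm, Nat.add_mul_mod_self_right, Nat.mod_eq_of_lt hb]

-- A's inner-loop body at global step c equals pvStepC plus counter bumps
theorem pvStepEq (pwd : String) (n base : Int) (S R : Nat) (L : List String)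
    (a b c : Nat) (hb : b < R) (hc : c = a * R + b) :
    pvInnerA pwd n (S : Int) (L, 1 + (c : Int), base + (c : Int)) (a : Int) (b : Int)
      = (pvStepC pwd.toList base n.toNat S R L c, (1 + (c : Int)) + 1, (base + (c : Int)) + 1) := by
  have hR : 0 < R := by omega
  have hdiv : c / R = a := by subst hc; exact (pvFlatDivMod a b R hb).1
  have hmod : c % R = b := by subst hc; exact (pvFlatDivMod a b R hb).2
  have hidx : (a : Int) + (b : Int) * (S : Int) = ((a + b * S : Nat) : Int) := by push_cast; ring
  have hidx2 : c / R + c % R * S = a + b * S := by rw [hdiv, hmod]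
  have hget : PySem.Str.pyGet? pwd (1 + (c : Int)) = pwd.toList[1 + c]? := by
    rw [show (1 : Int) + (c : Int) = ((1 + c : Nat) : Int) by push_cast; ring]
    rw [show PySem.Str.pyGet? pwd ((1 + c : Nat) : Int) = PySem.List.pyGet? pwd.toList ((1 + c : Nat) : Int) from by simp [PySem.Str.pyGet?]]
    rw [PySem.List.pyGet?_natCast]
  unfold pvInnerA pvStepC
  simp only [hidx, hidx2, hget, PySem.Str.len_eq]
  have hcond : (((a + b * S : Nat) : Int) < n ∧ 1 + (c : Int) < ((pwd.toList.length : Nat) : Int))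
      ↔ (a + b * S < n.toNat ∧ 1 + c < pwd.toList.length) := by
    constructor <;> (intro ⟨h1, h2⟩; exact ⟨by omega, by omega⟩)
  by_cases h : a + b * S < n.toNat ∧ 1 + c < pwd.toList.length
  · rw [if_pos (hcond.mpr h), if_pos h]
    obtain ⟨ch, hch⟩ : ∃ ch, pwd.toList[1 + c]? = some ch :=
      ⟨pwd.toList[1+c], List.getElem?_eq_getElem h.2⟩
    rw [hch]
    unfold pvGcell
    rw [hch]
    simp only [Prod.mk.injEq, and_true]
    simp only [Int.toNat_natCast]
  · rw [if_neg (fun hh => h (hcond.mp hh)), if_neg h]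

-- the inner fold over j = 0..B-1, started at global step a*R, flattened
theorem pvInnerFold (pwd : String) (n base : Int) (S R a : Nat) :
    ∀ (B : Nat), B ≤ R → ∀ (L : List String),
    (List.range B).foldl (fun st (b : Nat) => pvInnerA pwd n (S : Int) st (a : Int) (b : Int))
        (L, 1 + ((a * R : Nat) : Int), base + ((a * R : Nat) : Int))
      = ((List.range B).foldl (fun L b => pvStepC pwd.toList base n.toNat S R L (a * R + b)) L,
         1 + ((a * R + B : Nat) : Int), base + ((a * R + B : Nat) : Int)) := by
  intro B
  induction B with
  | zero => intro _ L; simp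
  | succ B ih =>
    intro hB L
    rw [List.range_succ, List.foldl_append, List.foldl_append, ih (by omega)]
    rw [List.foldl_cons, List.foldl_nil, List.foldl_cons, List.foldl_nil]
    rw [pvStepEq pwd n base S R _ a B (a * R + B) (by omega) rfl]
    simp only [Prod.mk.injEq, true_and]
    constructor <;> (push_cast; ring)

-- the nested fold over i < A', j < R, flattened into one pass over c < A'*R
theorem pvOuterFold (pwd : String) (n base : Int) (S R : Nat) (L : List String) :
    ∀ (A' : Nat),
    (List.range A').foldl
        (fun st (a : Nat) => (List.range R).foldl (fun st (b : Nat) => pvInnerA pwd n (S : Int) st (a : Int) (b : Int)) st)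
        (L, 1, base)
      = ((List.range (A' * R)).foldl (pvStepC pwd.toList base n.toNat S R) L,
         1 + ((A' * R : Nat) : Int), base + ((A' * R : Nat) : Int)) := by
  intro A'
  induction A' with
  | zero => simp
  | succ A' ih =>
    rw [List.range_succ, List.foldl_append, ih, List.foldl_cons, List.foldl_nil]
    rw [pvInnerFold pwd n base S R A' R (le_refl R)]
    rw [show (A' + 1) * R = A' * R + R by ring, List.range_add, List.foldl_append, List.foldl_map]

theorem pvIdxCinv (S R N k : Nat) (hS : 0 < S) (_hR : 0 < R) (hN : N ≤ S * R) (hk : k < N) :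
    (k % S) * R + k / S < S * R ∧
      ((k % S) * R + k / S) / R + (((k % S) * R + k / S) % R) * S = k := by
  have ha : k % S < S := Nat.mod_lt _ hS
  have hb : k / S < R := by
    rw [Nat.div_lt_iff_lt_mul hS]
    calc k < N := hk
    _ ≤ S * R := hN
    _ = R * S := by ring
  constructor
  · calc (k % S) * R + k / S < (k % S) * R + R := by omega
    _ = (k % S + 1) * R := by ring
    _ ≤ S * R := Nat.mul_le_mul_right _ (by omega)
  · rw [(pvFlatDivMod (k % S) (k / S) R hb).1, (pvFlatDivMod (k % S) (k / S) R hb).2,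
        Nat.mul_comm, Nat.add_comm, Nat.div_add_mod]

theorem pvCinvIdx (S R c : Nat) (hR : 0 < R) (hc : c < S * R) :
    ((c / R + (c % R) * S) % S) * R + (c / R + (c % R) * S) / S = c := by
  have hS : 0 < S := by
    rcases Nat.eq_zero_or_pos S with h | h
    · subst h; simp at hc
    · exact h
  have hi : c / R < S := by rw [Nat.div_lt_iff_lt_mul hR]; omega
  have hmod : (c / R + (c % R) * S) % S = c / R := by
    rw [Nat.add_mul_mod_self_right, Nat.mod_eq_of_lt hi]
  have hdiv : (c / R + (c % R) * S) / S = c % R := by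
    rw [Nat.add_mul_div_right _ _ hS, Nat.div_eq_of_lt hi, Nat.zero_add]

  rw [hmod, hdiv, Nat.mul_comm, Nat.add_comm, Nat.mod_add_div]

-- the buffer after M flat steps, read at position k
theorem pvFoldGet (pl : List Char) (base : Int) (N S R : Nat)
    (hS : 0 < S) (hR : 0 < R) (hN : N ≤ S * R) :
    ∀ (M : Nat), M ≤ S * R → ∀ (k : Nat), k < N →
    ((List.range M).foldl (pvStepC pl base N S R) (List.replicate N ""))[k]? =
      some (if (k % S) * R + k / S < M then pvGcell pl base ((k % S) * R + k / S) else "") := by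
  intro M
  induction M with
  | zero =>
    intro _ k hk
    simp [hk]
  | succ M ih =>
    intro hM k hk
    have hM' : M ≤ S * R := by omega
    rw [List.range_succ, List.foldl_append, List.foldl_cons, List.foldl_nil]
    set LM := (List.range M).foldl (pvStepC pl base N S R) (List.replicate N "") with hLM
    have hlen : LM.length = N := by rw [hLM, pvFoldLen]; simp
    have hinv := pvIdxCinv S R N k hS hR hN hk
    unfold pvStepC
    by_cases hcond : M / R + M % R * S < N ∧ 1 + M < pl.length
    · rw [if_pos hcond]
      by_cases heq : M / R + M % R * S = k
      · have hck : (k % S) * R + k / S = M := by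
          rw [← heq]; exact pvCinvIdx S R M hR (by omega)
        rw [heq, hck]
        rw [List.getElem?_set_self (by omega)]
        rw [if_pos (by omega)]
      · rw [List.getElem?_set_ne heq, ih hM' k hk]
        have hne : (k % S) * R + k / S ≠ M := by
          intro hcm
          apply heq
          have h2 := hinv.2
          rw [hcm] at h2
          omega
        congr 1
        simp [show ((k % S) * R + k / S < M + 1) ↔ ((k % S) * R + k / S < M) by omega]
    · rw [if_neg hcond]
      by_cases hcm : (k % S) * R + k / S = M
      · -- the write at step M was skipped: cell k keeps "" and pvGcell is "" too
        have hidxk : M / R + M % R * S = k := by rw [← hcm]; exact hinv.2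
        have hlen2 : ¬ (1 + M < pl.length) := fun hcontra => hcond ⟨by omega, hcontra⟩
        have hcellnone : pl[1+M]? = none := by rw [List.getElem?_eq_none_iff]; omega
        rw [ih hM' k hk, hcm, if_neg (by omega), if_pos (by omega)]
        unfold pvGcell
        rw [hcellnone]
      · rw [ih hM' k hk]
        congr 1
        simp [show ((k % S) * R + k / S < M + 1) ↔ ((k % S) * R + k / S < M) by omega]

-- A's whole nested loop, as one flat pass (cast bookkeeping around pvOuterFold)
theorem pvAfold (pwd : String) (n bs : Int) (S R : Nat) (L : List String) :
    (PySem.List.pyRange 0 ((S : Nat) : Int) 1).foldl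
        (fun st i => (PySem.List.pyRange 0 ((R : Nat) : Int) 1).foldl
          (fun st j => pvInnerA pwd n ((S : Nat) : Int) st i j) st)
        (L, 1, bs)
      = ((List.range (S * R)).foldl (pvStepC pwd.toList bs n.toNat S R) L,
         1 + ((S * R : Nat) : Int), bs + ((S * R : Nat) : Int)) := by
  have h1 : PySem.List.pyRange 0 ((S : Nat) : Int) 1 = (List.range S).map (fun k : Nat => (k : Int)) := by
    rw [PySem.List.pyRange_one]; simp
  have h2 : PySem.List.pyRange 0 ((R : Nat) : Int) 1 = (List.range R).map (fun k : Nat => (k : Int)) := by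
    rw [PySem.List.pyRange_one]; simp
  rw [h1]
  simp only [h2, List.foldl_map]
  exact pvOuterFold pwd n bs S R L S

-- A's buffer after the whole pass = B's gathered list
theorem pvListsEq (pl : List Char) (bs : Int) (N S R : Nat)
    (hS : 0 < S) (hR : 0 < R) (hN : N ≤ S * R) :
    (List.range (S * R)).foldl (pvStepC pl bs N S R) (List.replicate N "")
      = (List.range N).map (fun k => pvGcell pl bs ((k % S) * R + k / S)) := by
  apply List.ext_getElem?
  intro k
  by_cases hk : k < N
  · rw [pvFoldGet pl bs N S R hS hR hN (S * R) (le_refl _) k hk]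
    rw [List.getElem?_map, List.getElem?_range hk]
    simp [(pvIdxCinv S R N k hS hR hN hk).1]
  · have h1 : ((List.range (S * R)).foldl (pvStepC pl bs N S R) (List.replicate N "")).length = N := by
      rw [pvFoldLen]; simp
    rw [List.getElem?_eq_none_iff.mpr (by omega), List.getElem?_eq_none_iff.mpr (by simpa using by omega)]

-- B's mapped list, with the Int index arithmetic pushed down to Nat
theorem pvBlist (pwd : String) (bs : Int) (S R N : Nat) :
    ((PySem.List.pyRange 0 ((N : Nat) : Int) 1).map (fun idx =>
      let c := PySem.Int.mod idx ((S : Nat) : Int) * ((R : Nat) : Int) + PySem.Int.floordiv idx ((S : Nat) : Int)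
      if 1 + c < PySem.Str.len pwd then
        match PySem.Str.pyGet? pwd (1 + c) with
        | some ch => String.singleton (Char.ofNat ((ch.toNat : Int) - (bs + c)).toNat)
        | none => ""
      else ""))
    = (List.range N).map (fun k => pvGcell pwd.toList bs ((k % S) * R + k / S)) := by
  have h1 : PySem.List.pyRange 0 ((N : Nat) : Int) 1 = (List.range N).map (fun k : Nat => (k : Int)) := by
    rw [PySem.List.pyRange_one]; simp
  rw [h1, List.map_map]
  apply List.map_congr_left
  intro k _
  show (let c := PySem.Int.mod (k : Int) ((S : Nat) : Int) * ((R : Nat) : Int) + PySem.Int.floordiv (k : Int) ((S : Nat) : Int)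
        if 1 + c < PySem.Str.len pwd then
          match PySem.Str.pyGet? pwd (1 + c) with
          | some ch => String.singleton (Char.ofNat ((ch.toNat : Int) - (bs + c)).toNat)
          | none => ""
        else "") = pvGcell pwd.toList bs ((k % S) * R + k / S)
  have hc : PySem.Int.mod (k : Int) ((S : Nat) : Int) * ((R : Nat) : Int) + PySem.Int.floordiv (k : Int) ((S : Nat) : Int)
      = (((k % S) * R + k / S : Nat) : Int) := by
    rw [PySem.Int.mod_natCast, PySem.Int.floordiv_natCast]
    push_cast
    ring
  simp only [hc, PySem.Str.len_eq]
  have hget : PySem.Str.pyGet? pwd (1 + (((k % S) * R + k / S : Nat) : Int)) = pwd.toList[1 + ((k % S) * R + k / S)]? := by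
    rw [show (1 : Int) + (((k % S) * R + k / S : Nat) : Int) = ((1 + ((k % S) * R + k / S) : Nat) : Int) by push_cast; ring]
    rw [show PySem.Str.pyGet? pwd ((1 + ((k % S) * R + k / S) : Nat) : Int)
          = PySem.List.pyGet? pwd.toList ((1 + ((k % S) * R + k / S) : Nat) : Int) from by simp [PySem.Str.pyGet?]]
    rw [PySem.List.pyGet?_natCast]
  by_cases hcase : 1 + ((k % S) * R + k / S) < pwd.toList.length
  · rw [if_pos (by exact_mod_cast by omega : (1 : Int) + (((k % S) * R + k / S : Nat) : Int) < ((pwd.toList.length : Nat) : Int))]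
    obtain ⟨ch, hch⟩ : ∃ ch, pwd.toList[1 + ((k % S) * R + k / S)]? = some ch :=
      ⟨pwd.toList[1 + ((k % S) * R + k / S)], List.getElem?_eq_getElem hcase⟩
    rw [hget, hch]
    unfold pvGcell
    rw [hch]
  · rw [if_neg (by intro hcontra; apply hcase; omega)]
    unfold pvGcell
    rw [List.getElem?_eq_none_iff.mpr (by omega)]

-- the two ports agree on every input (Python's raising inputs are none-branches both ports share)
theorem pvPortsEq (pwd : String) (code : Int) : decodePwd pwd code = decodePwd_alt pwd code := by
  unfold decodePwd decodePwd_alt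
  cases h0 : PySem.Str.pyGet? pwd 0 with
  | none => dsimp only
  | some c0 =>
    dsimp only
    set sp : Int := PySem.Int.floordiv code 10 + 1 with hsp
    set bs : Int := PySem.Int.mod code 10 + 1 with hbs
    set n : Int := (c0.toNat : Int) - bs - 32 with hn
    set rows : Int := -(PySem.Int.floordiv (-n) sp) with hrows
    by_cases hsl : sp ≤ 0
    · rw [if_pos hsl, PySem.List.pyRange_one_eq_nil hsl, List.foldl_nil]
      exact pvJoinRep n.toNat
    · have hsl' : 0 < sp := by omega
      rw [if_neg hsl]
      obtain ⟨S, hS⟩ : ∃ S : Nat, sp = ((S : Nat) : Int) := ⟨sp.toNat, by omega⟩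
      have hS0 : 0 < S := by omega
      by_cases hn0 : n ≤ 0
      · have hfd : 0 ≤ PySem.Int.floordiv (-n) sp := by
          rw [PySem.Int.floordiv_eq_ediv_of_pos hsl']
          exact Int.ediv_nonneg (by omega) (by omega)
        have hrneg : rows ≤ 0 := by rw [hrows]; omega
        rw [PySem.List.pyRange_one_eq_nil hn0]
        simp only [PySem.List.pyRange_one_eq_nil hrneg, List.foldl_nil]
        rw [pvFoldlId, List.map_nil]
        rw [show n.toNat = 0 from by omega]
        exact pvJoinRep 0
      · have hn0' : 0 < n := by omega
        have hrfacts := (PySem.Int.neg_floordiv_neg_eq_iff_of_pos hsl').mp hrows.symm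
        have hrpos : 0 < rows := by nlinarith [hrfacts.2]
        obtain ⟨R, hR⟩ : ∃ R : Nat, rows = ((R : Nat) : Int) := ⟨rows.toNat, by omega⟩
        have hR0 : 0 < R := by omega
        have hNle : n.toNat ≤ S * R := by
          have h2 : n ≤ ((S * R : Nat) : Int) := by
            calc n ≤ rows * sp := hrfacts.2
            _ = ((S * R : Nat) : Int) := by rw [hS, hR]; push_cast; ring
          omega
        rw [hS, hR]
        rw [pvAfold pwd n bs S R (List.replicate n.toNat "")]
        rw [pvListsEq pwd.toList bs n.toNat S R hS0 hR0 hNle]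
        rw [show n = ((n.toNat : Nat) : Int) from by omega]
        rw [pvBlist pwd bs S R n.toNat]
        simp only [Int.toNat_natCast]

-- ===== VERDICT (by name: the statement is the Claim_ definition above) =====
theorem decodePwd_spec : Claim_equal_decodePwd := by
  intro pwd code _ _
  unfold Spec_decodePwd
  exact pvPortsEq pwd code
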